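-- pv_equiv track=rewrite | github.com/uroborus2s/docs-stratego | src/docs_stratego/site_builder.py | html_fragment_id
-- ===== SOURCE A (Python) =====
-- def html_fragment_id(value: str) -> str:
--     sanitized = [
--         char.lower() if char.isalnum() else "-" for char in value
--     ]
--     collapsed = "".join(sanitized).strip("-")
--     while "--" in collapsed:
--         collapsed = collapsed.replace("--", "-")
--     return collapsed or "docs-contract"
-- ===== SOURCE B (Python) =====
-- def html_fragment_id(value: str) -> str:
--     out = []
--     for ch in value:
--         if ch.isalnum():
--             out.append(ch.lower())
--         elif out and out[-1] != "-":
--             out.append("-")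
--     if out and out[-1] == "-":
--         out.pop()
--     return "".join(out) or "docs-contract"
-- ===== Notes on version B (the rewrite author's own statement) =====
-- stated objective: alternative
-- what changed: Replaced A's staged pipeline (map every char, join, strip dashes at both ends, then repeatedly rescan the whole string replacing double dashes until none remain) with a single left-to-right fold that appends lowered alphanumerics and suppresses leading and duplicate dashes as it goes, trimming the at most one possible trailing dash afterwards.
import Mathlib
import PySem

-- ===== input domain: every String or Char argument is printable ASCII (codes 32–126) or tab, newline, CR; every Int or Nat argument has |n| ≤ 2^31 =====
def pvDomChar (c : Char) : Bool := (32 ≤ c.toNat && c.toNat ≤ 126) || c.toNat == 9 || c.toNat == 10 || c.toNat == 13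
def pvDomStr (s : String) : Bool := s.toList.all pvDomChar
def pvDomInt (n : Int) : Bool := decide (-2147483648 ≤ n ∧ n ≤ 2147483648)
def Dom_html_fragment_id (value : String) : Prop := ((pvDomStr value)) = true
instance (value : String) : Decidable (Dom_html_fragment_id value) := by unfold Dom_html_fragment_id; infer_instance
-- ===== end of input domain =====

-- B replaces A's map/join/strip('-')/repeated replace("--","-") pipeline by one left-to-right
-- fold with a last-emitted-char-is-a-dash invariant; equal return value proved below.

-- ===== PORT A =====
-- the 'while "--" in collapsed: collapsed = collapsed.replace("--", "-")' loop; the fuel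
-- argument is the string's length, which provably suffices (each pass shortens the string,
-- see loop_eq_clps below), so the loop always exits via its own test, as in Python
def htmlCollapseLoop : Nat → List Char → List Char
  | 0, s => s
  | fuel + 1, s =>
    if PySem.Chars.isIn ['-', '-'] s then
      htmlCollapseLoop fuel (PySem.Chars.replace s ['-', '-'] ['-'])
    else s

def html_fragment_id (value : String) : String :=
  let sanitized : List Char :=
    value.toList.map (fun ch => if PySem.Chars.isalnum ch then PySem.Chars.lowerChar ch else '-')
  let collapsed : List Char := PySem.Chars.stripChars sanitized ['-']
  let collapsed : List Char := htmlCollapseLoop collapsed.length collapsed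
  if collapsed.isEmpty then "docs-contract" else String.ofList collapsed

-- ===== PORT B =====
-- one step of Source B's loop: append the lowered alnum char, else a dash unless out is empty
-- or already ends in a dash
def htmlAltStep (acc : List Char) (ch : Char) : List Char :=
  if PySem.Chars.isalnum ch then acc ++ [PySem.Chars.lowerChar ch]
  else if acc ≠ [] ∧ acc.getLast? ≠ some '-' then acc ++ ['-']
  else acc

def html_fragment_id_alt (value : String) : String :=
  let out : List Char := value.toList.foldl htmlAltStep []
  let out : List Char := if out ≠ [] ∧ out.getLast? = some '-' then out.dropLast else out
  if out.isEmpty then "docs-contract" else String.ofList out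

-- ===== PRECONDITION & SPEC =====
def Spec_html_fragment_id (value : String) (out : String) : Prop := out = html_fragment_id_alt value
instance (value : String) (out : String) : Decidable (Spec_html_fragment_id value out) := by unfold Spec_html_fragment_id; infer_instance

-- ===== CLAIM (what is proved, stated in full; the proofs are below) =====
def Claim_equal_html_fragment_id : Prop := ∀ (value : String), Dom_html_fragment_id value → Spec_html_fragment_id value (html_fragment_id value)

-- ===== LEMMAS AND PROOFS =====

-- one pass of str.replace("--", "-"), written structurally
def repDD : List Char → List Char
  | [] => []
  | c :: xs => if c = '-' ∧ xs.head? = some '-' then '-' :: repDD xs.tail else c :: repDD xs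
  termination_by s => s.length
  decreasing_by all_goals simp [List.length_tail]

lemma go_eq (fuel : Nat) : ∀ (l acc : List Char), l.length ≤ fuel →
    PySem.Chars.replace.go ['-', '-'] ['-'] fuel l acc = acc.reverse ++ repDD l := by
  induction fuel with
  | zero =>
    intro l acc h
    have : l = [] := by cases l <;> simp_all
    subst this
    simp [PySem.Chars.replace.go, repDD]
  | succ n ih =>
    intro l acc h
    match l with
    | [] => simp [PySem.Chars.replace.go, repDD]
    | c :: t =>
      rw [PySem.Chars.replace.go]
      by_cases hp : (['-', '-'] : List Char).isPrefixOf (c :: t) = true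
      · have hpre : c = '-' ∧ t.head? = some '-' := by
          cases t with
          | nil => simp [List.isPrefixOf] at hp
          | cons b ys => simp [List.isPrefixOf] at hp; exact ⟨hp.1.symm, by simp [hp.2.symm]⟩
        obtain ⟨rfl, hh⟩ := hpre
        cases t with
        | nil => simp at hh
        | cons b ys =>
          simp at hh; subst hh
          simp only [hp, if_true, List.length_cons, List.drop_succ_cons, List.drop_zero,
            List.length_nil, List.reverse_cons, List.reverse_nil, List.nil_append]
          rw [show (['-'] : List Char) ++ acc = '-' :: acc from rfl]
          rw [ih ys ('-' :: acc) (by simp at h ⊢; omega)]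
          rw [repDD]
          simp
      · simp only [hp]
        rw [ih t (c :: acc) (by simp at h ⊢; omega)]
        have hnp : ¬ (c = '-' ∧ t.head? = some '-') := by
          rintro ⟨hc, hh⟩
          cases t with
          | nil => simp at hh
          | cons b ys =>
            simp at hh
            exact hp (by simp [List.isPrefixOf, hc, hh])
        rw [repDD]
        simp [hnp]

def hasDD : List Char → Bool
  | [] => false
  | c :: xs => decide (c = '-' ∧ xs.head? = some '-') || hasDD xs

def clps : List Char → List Char
  | [] => []
  | c :: xs => if c = '-' ∧ xs.head? = some '-' then clps xs else c :: clps xs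

lemma replace_eq (s : List Char) : PySem.Chars.replace s ['-', '-'] ['-'] = repDD s := by
  rw [PySem.Chars.replace]
  simp [go_eq s.length s [] le_rfl]

lemma infix_dd (s : List Char) : (['-', '-'] : List Char) <:+: s ↔ hasDD s = true := by
  induction s with
  | nil => simp [hasDD]
  | cons c xs ih =>
    rw [List.infix_cons_iff, hasDD]
    constructor
    · rintro (hpre | hinf)
      · cases xs with
        | nil => simp at hpre
        | cons b ys =>
          rw [List.cons_prefix_cons] at hpre
          obtain ⟨rfl, hpre⟩ := hpre
          rw [List.cons_prefix_cons] at hpre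
          simp [hpre.1.symm]
      · simp [ih.mp hinf]
    · intro h
      simp only [Bool.or_eq_true, decide_eq_true_eq] at h
      rcases h with ⟨rfl, hh⟩ | h
      · left
        cases xs with
        | nil => simp at hh
        | cons b ys => simp at hh; subst hh; simp [List.cons_prefix_cons]
      · right; exact ih.mpr h

lemma isIn_eq_hasDD (s : List Char) : PySem.Chars.isIn ['-', '-'] s = hasDD s := by
  by_cases h : hasDD s = true
  · rw [h, (PySem.Chars.isIn_iff_infix _ _).mpr (infix_dd s |>.mpr h)]
  · simp only [Bool.not_eq_true] at h
    rw [h, (PySem.Chars.isIn_eq_false_iff _ _).mpr (fun hc => by simp [infix_dd s |>.mp hc] at h)]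

lemma repDD_len_le (s : List Char) : (repDD s).length ≤ s.length := by
  fun_induction repDD with
  | case1 => simp
  | case2 c xs h ih => cases xs with
    | nil => simp at h
    | cons b ys => simpa using Nat.le_trans (by simpa using ih) (by simp)
  | case3 c xs h ih => simpa using ih

lemma repDD_len_lt (s : List Char) (h : hasDD s = true) : (repDD s).length < s.length := by
  fun_induction repDD with
  | case1 => simp [hasDD] at h
  | case2 c xs hc ih =>
    cases xs with
    | nil => simp at hc
    | cons b ys =>
      have := repDD_len_le ys
      simp at *
      omega
  | case3 c xs hc ih =>
    rw [hasDD] at h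
    simp only [Bool.or_eq_true, decide_eq_true_eq] at h
    rcases h with hcc | h
    · exact absurd hcc hc
    · simpa using ih h

lemma clps_of_not_hasDD (s : List Char) (h : hasDD s = false) : clps s = s := by
  fun_induction clps with
  | case1 => rfl
  | case2 c xs hc ih => simp [hasDD, hc] at h
  | case3 c xs hc ih =>
    rw [hasDD] at h
    simp only [Bool.or_eq_false_iff] at h
    rw [ih h.2]

lemma clps_cons_ne (c : Char) (w : List Char) (hc : c ≠ '-') : clps (c :: w) = c :: clps w := by
  rw [clps, if_neg (by rintro ⟨h, _⟩; exact hc h)]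

lemma clps_dd (w : List Char) : clps ('-' :: '-' :: w) = clps ('-' :: w) := by
  rw [clps]; simp

lemma clps_repDD (s : List Char) : clps (repDD s) = clps s ∧ clps ('-' :: repDD s) = clps ('-' :: s) := by
  generalize hn : s.length = n
  induction n using Nat.strong_induction_on generalizing s with
  | _ n ih =>
    match s with
    | [] => simp [repDD]
    | c :: xs =>
      by_cases hc : c = '-' ∧ xs.head? = some '-'
      · obtain ⟨hc1, hc2⟩ := hc
        subst hc1
        cases xs with
        | nil => simp at hc2
        | cons b ys =>
          simp at hc2; subst hc2
          rw [show repDD ('-' :: '-' :: ys) = '-' :: repDD ys from by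
            rw [repDD, if_pos (by simp)]; rfl]
          have ihy := ih ys.length (by simp at hn; omega) ys rfl
          constructor
          · rw [clps_dd, ihy.2]
          · rw [clps_dd, clps_dd, clps_dd, ihy.2]
      · rw [show repDD (c :: xs) = c :: repDD xs from by rw [repDD, if_neg hc]]
        have ihx := ih xs.length (by simp at hn; omega) xs rfl
        by_cases hcd : c = '-'
        · subst hcd
          have hxh : xs.head? ≠ some '-' := fun h => hc ⟨rfl, h⟩
          constructor
          · rw [ihx.2]
          · have h1 : clps ('-' :: '-' :: repDD xs) = clps ('-' :: repDD xs) := clps_dd _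
            have h2 : clps ('-' :: '-' :: xs) = clps ('-' :: xs) := clps_dd _
            rw [h1, h2, ihx.2]
        · constructor
          · rw [clps_cons_ne c _ hcd, clps_cons_ne c _ hcd, ihx.1]
          · rw [show clps ('-' :: c :: repDD xs) = '-' :: clps (c :: repDD xs) from by
              rw [clps, if_neg (by rintro ⟨_, h⟩; simp at h; exact hcd h)],
              show clps ('-' :: c :: xs) = '-' :: clps (c :: xs) from by
              rw [clps, if_neg (by rintro ⟨_, h⟩; simp at h; exact hcd h)],
              clps_cons_ne c _ hcd, clps_cons_ne c _ hcd, ihx.1]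

lemma loop_eq_clps (fuel : Nat) : ∀ s : List Char, s.length ≤ fuel → htmlCollapseLoop fuel s = clps s := by
  induction fuel with
  | zero =>
    intro s h
    have : s = [] := by cases s <;> simp_all
    subst this; rfl
  | succ n ih =>
    intro s h
    rw [htmlCollapseLoop, isIn_eq_hasDD, replace_eq]
    by_cases hd : hasDD s = true
    · rw [if_pos hd, ih (repDD s) (by have := repDD_len_lt s hd; omega)]
      exact (clps_repDD s).1
    · simp only [Bool.not_eq_true] at hd
      rw [hd, clps_of_not_hasDD s hd]
      simp

lemma clps_dash_cons (xs : List Char) :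
    clps ('-' :: xs) = '-' :: clps (xs.dropWhile (· == '-')) := by
  induction xs with
  | nil => simp [clps]
  | cons b ys ih =>
    by_cases hb : b = '-'
    · subst hb
      rw [show clps ('-' :: '-' :: ys) = clps ('-' :: ys) from by rw [clps]; simp, ih]
      simp [List.dropWhile]
    · rw [clps, if_neg (by rintro ⟨_, h⟩; simp at h; exact hb h)]
      have hbe : (b == '-') = false := by simp [hb]
      rw [List.dropWhile, hbe]

def emitB : Bool → List Char → List Char
  | _, [] => []
  | b, c :: xs =>
    if c = '-' then (if b then '-' :: emitB false xs else emitB false xs)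
    else c :: emitB true xs

lemma lower_ne_dash (c : Char) (h : PySem.Chars.isalnum c = true) : PySem.Chars.lowerChar c ≠ '-' := by
  rw [PySem.Chars.lowerChar]
  by_cases hu : PySem.Chars.isupper c = true
  · rw [if_pos hu]
    rw [PySem.Chars.isupper] at hu
    simp only [Bool.and_eq_true, decide_eq_true_eq, Char.le_def, UInt32.le_iff_toNat_le] at hu
    have hlo : 65 ≤ c.toNat := hu.1
    have hhi : c.toNat ≤ 90 := hu.2
    intro hEq
    have hT := congrArg Char.toNat hEq
    rw [Char.toNat_ofNat] at hT
    have hval : (c.toNat + 32).isValidChar := Or.inl (by omega)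
    rw [if_pos hval] at hT
    have : c.toNat + 32 = 45 := by simpa using hT
    omega
  · rw [if_neg hu]
    intro hEq
    subst hEq
    simp [PySem.Chars.isalnum, PySem.Chars.isalpha, PySem.Chars.isdigit, PySem.Chars.islower,
      PySem.Chars.isupper] at h hu

lemma clps_dropWhile (s : List Char) :
    clps (s.dropWhile (· == '-')) = if (clps s).head? = some '-' then (clps s).tail else clps s := by
  cases s with
  | nil => simp [clps]
  | cons c xs =>
    by_cases hc : c = '-'
    · subst hc
      rw [clps_dash_cons]
      have hdw : List.dropWhile (· == '-') ('-' :: xs) = List.dropWhile (· == '-') xs := by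
        rw [List.dropWhile]; simp
      rw [hdw]
      simp
    · have hbe : (c == '-') = false := by simp [hc]
      rw [List.dropWhile, hbe, clps_cons_ne c _ hc]
      simp [hc]

lemma clps_snoc (u : List Char) (c : Char) :
    clps (u ++ [c]) = if u.getLast? = some '-' ∧ c = '-' then clps u else clps u ++ [c] := by
  induction u with
  | nil => simp [clps]
  | cons a xs ih =>
    cases xs with
    | nil =>
      by_cases h : a = '-' ∧ c = '-'
      · obtain ⟨ha, hcc⟩ := h
        rw [if_pos (by simp [ha, hcc])]
        rw [ha, hcc]
        simpa using clps_dd []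
      · rw [if_neg (by simpa using h)]
        have hne : ¬(a = '-' ∧ ([c] : List Char).head? = some '-') := by
          rintro ⟨h1, h2⟩; simp at h2; exact h ⟨h1, h2⟩
        rw [List.cons_append, List.nil_append, clps, if_neg hne]
        simp [clps]
    | cons b ys =>
      have hlast : (a :: b :: ys).getLast? = (b :: ys).getLast? := by
        rw [List.getLast?_cons_cons]
      by_cases hab : a = '-' ∧ b = '-'
      · have h1 : clps ((a :: b :: ys) ++ [c]) = clps ((b :: ys) ++ [c]) := by
          rw [List.cons_append, clps, if_pos (by simp [hab.1, hab.2])]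
        have h2 : clps (a :: b :: ys) = clps (b :: ys) := by
          rw [clps, if_pos (by simp [hab.1, hab.2])]
        rw [h1, h2, ih, hlast]
      · have h1 : clps ((a :: b :: ys) ++ [c]) = a :: clps ((b :: ys) ++ [c]) := by
          rw [List.cons_append, clps, if_neg (by rintro ⟨h, hh⟩; simp at hh; exact hab ⟨h, hh⟩)]
        have h2 : clps (a :: b :: ys) = a :: clps (b :: ys) := by
          rw [clps, if_neg (by rintro ⟨h, hh⟩; simp at hh; exact hab ⟨h, hh⟩)]
        rw [h1, h2, ih, hlast]
        split_ifs <;> simp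

lemma clps_reverse (u : List Char) : clps u.reverse = (clps u).reverse := by
  induction u with
  | nil => rfl
  | cons c xs ih =>
    rw [List.reverse_cons, clps_snoc, List.getLast?_reverse]
    by_cases h : c = '-' ∧ xs.head? = some '-'
    · rw [if_pos ⟨h.2, h.1⟩, ih]
      rw [show clps (c :: xs) = clps xs from by rw [clps, if_pos h]]
    · rw [if_neg (fun hh => h ⟨hh.2, hh.1⟩), ih]
      rw [show clps (c :: xs) = c :: clps xs from by rw [clps, if_neg h]]
      rw [List.reverse_cons]

lemma emitB_eq (t : List Char) :
    emitB true t = clps t ∧ emitB false t = clps (t.dropWhile (· == '-')) := by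
  induction t with
  | nil => simp [emitB, clps]
  | cons c xs ih =>
    by_cases hc : c = '-'
    · subst hc
      constructor
      · rw [show emitB true ('-' :: xs) = '-' :: emitB false xs from by rw [emitB]; simp]
        rw [ih.2, clps_dash_cons]
      · rw [show emitB false ('-' :: xs) = emitB false xs from by rw [emitB]; simp]
        rw [ih.2]
        congr 1
    · have hbe : (c == '-') = false := by simp [hc]
      have he : ∀ b, emitB b (c :: xs) = c :: emitB true xs := by
        intro b; rw [emitB, if_neg hc]
      constructor
      · rw [he, ih.1, clps_cons_ne c _ hc]
      · rw [he, ih.1, List.dropWhile, hbe, clps_cons_ne c _ hc]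

lemma emitB_cons_ne (b : Bool) (c : Char) (xs : List Char) (hc : c ≠ '-') :
    emitB b (c :: xs) = c :: emitB true xs := by
  rw [emitB, if_neg hc]

lemma emitB_dash_true (xs : List Char) : emitB true ('-' :: xs) = '-' :: emitB false xs := by
  rw [emitB]; simp

lemma emitB_dash_false (xs : List Char) : emitB false ('-' :: xs) = emitB false xs := by
  rw [emitB]; simp

lemma foldl_step_eq (t : List Char) : ∀ acc : List Char,
    t.foldl htmlAltStep acc
      = acc ++ emitB (decide (acc ≠ [] ∧ acc.getLast? ≠ some '-'))
          (t.map (fun ch => if PySem.Chars.isalnum ch then PySem.Chars.lowerChar ch else '-')) := by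
  induction t with
  | nil => intro acc; simp [emitB]
  | cons c xs ih =>
    intro acc
    by_cases ha : PySem.Chars.isalnum c = true
    · have hl := lower_ne_dash c ha
      have hstep : htmlAltStep acc c = acc ++ [PySem.Chars.lowerChar c] := by
        rw [htmlAltStep, if_pos ha]
      have h1 : decide (acc ++ [PySem.Chars.lowerChar c] ≠ [] ∧
          (acc ++ [PySem.Chars.lowerChar c]).getLast? ≠ some '-') = true := by
        simp [hl]
      rw [List.foldl_cons, hstep, ih, h1, List.map_cons, if_pos ha,
        emitB_cons_ne _ _ _ hl, List.append_assoc, List.singleton_append]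
    · rw [List.foldl_cons, List.map_cons, if_neg ha]
      have hstep : htmlAltStep acc c =
          if acc ≠ [] ∧ acc.getLast? ≠ some '-' then acc ++ ['-'] else acc := by
        rw [htmlAltStep, if_neg ha]
      by_cases hb : acc ≠ [] ∧ acc.getLast? ≠ some '-'
      · have h0 : decide (acc ≠ [] ∧ acc.getLast? ≠ some '-') = true := by
          simp [hb.1, hb.2]
        have h1 : decide (acc ++ ['-'] ≠ [] ∧ (acc ++ ['-']).getLast? ≠ some '-') = false := by
          simp
        rw [hstep, if_pos hb, ih, h0, h1, emitB_dash_true, List.append_assoc,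
          List.singleton_append]
      · have h0 : decide (acc ≠ [] ∧ acc.getLast? ≠ some '-') = false := by
          simpa using fun h1 h2 => hb ⟨h1, h2⟩
        rw [hstep, if_neg hb, ih, h0, emitB_dash_false]

lemma stripChars_dash (s : List Char) :
    PySem.Chars.stripChars s ['-']
      = ((s.dropWhile (· == '-')).reverse.dropWhile (· == '-')).reverse := by
  rw [PySem.Chars.stripChars]
  have hp : (fun c => List.contains ['-'] c) = (fun c : Char => c == '-') := by
    funext c; simp [BEq.beq]
  rw [hp]

lemma core_eq (u : List Char) :
    clps ((u.reverse.dropWhile (· == '-')).reverse)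
      = if (clps u).getLast? = some '-' then (clps u).dropLast else clps u := by
  rw [clps_reverse, clps_dropWhile, clps_reverse, List.head?_reverse]
  by_cases h : (clps u).getLast? = some '-'
  · rw [if_pos h, if_pos h, List.tail_reverse, List.reverse_reverse]
  · rw [if_neg h, if_neg h, List.reverse_reverse]

lemma ports_agree (value : String) : html_fragment_id value = html_fragment_id_alt value := by
  rw [html_fragment_id, html_fragment_id_alt]
  rw [foldl_step_eq]
  rw [show decide (([] : List Char) ≠ [] ∧ ([] : List Char).getLast? ≠ some '-') = false from by simp]
  rw [List.nil_append, (emitB_eq _).2]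
  rw [stripChars_dash, loop_eq_clps _ _ le_rfl, core_eq]
  set v := clps ((value.toList.map
    (fun ch => if PySem.Chars.isalnum ch then PySem.Chars.lowerChar ch else '-')).dropWhile (· == '-')) with hv
  rcases eq_or_ne v ([] : List Char) with h | h
  · rw [h]; simp
  · rw [show (if v ≠ [] ∧ v.getLast? = some '-' then v.dropLast else v)
        = (if v.getLast? = some '-' then v.dropLast else v) from by simp [h]]

-- ===== VERDICT (by name: the statement is the Claim_ definition above) =====
theorem html_fragment_id_spec : Claim_equal_html_fragment_id := by
  intro value _
  unfold Spec_html_fragment_id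
  exact ports_agree value
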